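-- pv_equiv track=rewrite | github.com/Garik-Mk/bulean_table | main.py | get_variables_positions
-- ===== SOURCE A (Python) =====
-- def get_variables_positions(string: str) -> list[list]:
--     """Returns [[2], [4,6], [8]], for string _ _ a _ b _ b _ c """
--     variables_dict = {}
--
--     for i, s in enumerate(string):
--         if s not in {'>', '!', '(', ')'}:
--             if s in variables_dict.keys():
--                 variables_dict[s].append(i)
--             else:
--                 variables_dict[s] = [i]
--
--     return list(variables_dict.values())
-- ===== SOURCE B (Python) =====
-- def get_variables_positions(string: str) -> list[list]:
--     """Returns [[2], [4,6], [8]], for string _ _ a _ b _ b _ c """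
--     operators = {'>', '!', '(', ')'}
--     variables = list(dict.fromkeys(c for c in string if c not in operators))
--     return [[i for i, s in enumerate(string) if s == v] for v in variables]
-- ===== Notes on version B (the rewrite author's own statement) =====
-- stated objective: alternative
-- what changed: Instead of one pass that grows per-key lists inside a dict, B first computes the ordered list of distinct variable characters (dict.fromkeys dedup) and then builds each group by scanning the whole string once per variable.
import Mathlib
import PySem

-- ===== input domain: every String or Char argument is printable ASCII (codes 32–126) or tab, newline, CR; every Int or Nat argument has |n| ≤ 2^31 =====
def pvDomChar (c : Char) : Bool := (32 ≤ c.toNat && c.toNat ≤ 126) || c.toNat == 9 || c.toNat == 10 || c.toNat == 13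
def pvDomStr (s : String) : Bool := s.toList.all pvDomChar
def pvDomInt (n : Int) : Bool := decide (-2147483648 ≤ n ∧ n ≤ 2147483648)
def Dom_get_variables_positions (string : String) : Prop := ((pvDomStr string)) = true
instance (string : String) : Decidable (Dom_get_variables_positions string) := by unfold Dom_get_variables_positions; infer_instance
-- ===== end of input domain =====

-- B replaces A's single grouping pass through a dict by "distinct variables first, then one scan per
-- variable for its positions" — an alternative decomposition, not claimed faster.

-- ===== PORT A =====
-- the operator characters A excludes
def gvpOps : List Char := ['>', '!', '(', ')']

-- one iteration of A's loop body over (i, s)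
def gvpStepA (d : PySem.Dict Char (List Int)) (p : Int × Char) : PySem.Dict Char (List Int) :=
  if gvpOps.contains p.2 then d
  else if d.contains p.2 then d.insert p.2 (d.getD p.2 [] ++ [p.1])  -- variables_dict[s].append(i)
  else d.insert p.2 [p.1]                                            -- variables_dict[s] = [i]

def get_variables_positions (string : String) : List (List Int) :=
  ((PySem.List.enumerate string.toList).foldl gvpStepA PySem.Dict.empty).values

-- ===== PORT B =====
def get_variables_positions_alt (string : String) : List (List Int) :=
  (PySem.List.dedup (string.toList.filter (fun c => !(['>', '!', '(', ')'] : List Char).contains c))).map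
    (fun v => ((PySem.List.enumerate string.toList).filter (fun p => p.2 == v)).map (·.1))

-- ===== PRECONDITION & SPEC =====
def Spec_get_variables_positions (string : String) (out : List (List Int)) : Prop := out = get_variables_positions_alt string
instance (string : String) (out : List (List Int)) : Decidable (Spec_get_variables_positions string out) := by unfold Spec_get_variables_positions; infer_instance

-- ===== CLAIM (what is proved, stated in full; the proofs are below) =====
def Claim_equal_get_variables_positions : Prop := ∀ (string : String), Dom_get_variables_positions string → Spec_get_variables_positions string (get_variables_positions string)

-- ===== LEMMAS AND PROOFS =====

-- A's loop body is append-or-create, i.e. a Dict.modify on non-operator characters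
lemma gvpStepA_eq (d : PySem.Dict Char (List Int)) (p : Int × Char) :
    gvpStepA d p = if gvpOps.contains p.2 then d else d.modify p.2 [] (· ++ [p.1]) := by
  unfold gvpStepA
  by_cases hop : gvpOps.contains p.2 <;> simp only [List.contains_iff_mem] at hop
  · simp [hop]
  · by_cases hc : d.contains p.2
    · simp [hop, hc, PySem.Dict.modify]
    · have hg : d.getD p.2 [] = [] := PySem.Dict.getD_of_not_contains _ _ (by simpa using hc)
      simp [hop, hc, PySem.Dict.modify, hg]

-- A's whole loop is the modify-loop over the operator-filtered enumerated pairs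
lemma gvp_fold_eq (xs : List (Int × Char)) :
    xs.foldl gvpStepA PySem.Dict.empty
      = (xs.filter (fun p => !gvpOps.contains p.2)).foldl
          (fun d p => d.modify p.2 [] (· ++ [p.1])) PySem.Dict.empty := by
  rw [List.foldl_filter]
  apply List.foldl_ext
  intro d p _
  rw [gvpStepA_eq]
  cases hop : gvpOps.contains p.2 <;> simp


-- a Nodup-keyed dict's values are its keys' lookups, in key order
lemma values_eq_map_getD (d : PySem.Dict Char (List Int)) (h : d.keys.Nodup) :
    d.values = d.keys.map (fun k => d.getD k []) := by
  simp only [PySem.Dict.keys, PySem.Dict.values, List.map_map]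
  apply List.map_congr_left
  intro p hp
  exact (PySem.Dict.getD_of_mem_items (d := d) (k := p.1) (v := p.2) (d0 := []) (by simpa using hp) h).symm

-- what the modify-loop dict looks up at any character
lemma gvp_getD (lf : List (Int × Char)) (v : Char) :
    (lf.foldl (fun d p => d.modify p.2 [] (· ++ [p.1])) PySem.Dict.empty).getD v []
      = (lf.filter (fun p => p.2 == v)).map (·.1) := by
  have hmap : lf.foldl (fun d p => d.modify p.2 [] (· ++ [p.1])) PySem.Dict.empty
      = (lf.map Prod.swap).foldl (fun d q => d.modify q.1 [] (· ++ [q.2])) PySem.Dict.empty := by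
    rw [List.foldl_map]
    apply List.foldl_ext
    intro d q _
    rfl
  rw [hmap, PySem.Dict.getD_foldl_modify_append, List.filter_map, List.map_map]
  simp [Function.comp_def, Prod.swap]

-- ===== VERDICT (by name: the statement is the Claim_ definition above) =====
theorem get_variables_positions_spec : Claim_equal_get_variables_positions := by
  intro s _
  unfold Spec_get_variables_positions get_variables_positions get_variables_positions_alt
  rw [gvp_fold_eq]
  set lf := (PySem.List.enumerate s.toList).filter (fun p => !gvpOps.contains p.2) with hlf
  set d := lf.foldl (fun d p => d.modify p.2 [] (· ++ [p.1])) PySem.Dict.empty with hd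
  have hkeys : d.keys = PySem.List.dedup (lf.map (·.2)) := by
    rw [hd, PySem.Dict.keys_foldl_modify_key]
    simp [PySem.Set.update, PySem.List.dedup_eq_ofList, PySem.Set.ofList_eq_foldl,
      PySem.Dict.keys_empty]
  have hnodup : d.keys.Nodup := by
    rw [hkeys]; exact PySem.List.nodup_dedup _
  have hsnd : lf.map (·.2) = s.toList.filter (fun c => !(['>', '!', '(', ')'] : List Char).contains c) := by
    rw [hlf]
    have hfac : (fun p : Int × Char => !gvpOps.contains p.2)
        = ((fun c : Char => !(['>', '!', '(', ')'] : List Char).contains c) ∘ (fun p : Int × Char => p.2)) := rfl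
    rw [hfac, ← List.filter_map, PySem.List.map_snd_enumerate]
  rw [values_eq_map_getD d hnodup, hkeys, hsnd]
  apply List.map_congr_left
  intro v hv
  have hvop : (!gvpOps.contains v) = true := by
    have := (PySem.List.mem_dedup _ _).mp hv
    simpa [gvpOps] using (List.mem_filter.mp this).2
  rw [gvp_getD, hlf, List.filter_filter]
  congr 1
  apply List.filter_congr
  intro p _
  by_cases h : p.2 = v
  · simp [h]
    simpa using hvop
  · simp [h]
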